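-- pv_equiv track=rewrite | github.com/rohankhanna/bespoke | src/bespoke_cli/embedding_pipeline.py | downsample_units
-- ===== SOURCE A (Python) =====
-- from typing import Any
--
-- def downsample_units(units: list[dict[str, Any]], max_units: int | None) -> list[dict[str, Any]]:
--     if max_units is None or len(units) <= max_units:
--         return units
--
--     buckets: dict[tuple[str, str], list[dict[str, Any]]] = {}
--     for unit in units:
--         key = (unit["part_kind"], unit["repo_slug"])
--         buckets.setdefault(key, []).append(unit)
--
--     ordered_keys = sorted(buckets)
--     selected: list[dict[str, Any]] = []
--     positions = {key: 0 for key in ordered_keys}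
--     while len(selected) < max_units:
--         made_progress = False
--         for key in ordered_keys:
--             position = positions[key]
--             bucket = buckets[key]
--             if position >= len(bucket):
--                 continue
--             selected.append(bucket[position])
--             positions[key] += 1
--             made_progress = True
--             if len(selected) >= max_units:
--                 break
--         if not made_progress:
--             break
--     return selected
-- ===== SOURCE B (Python) =====
-- def downsample_units(units, max_units):
--     if max_units is None or len(units) <= max_units:
--         return units
--
--     buckets = {}
--     for unit in units:
--         key = (unit["part_kind"], unit["repo_slug"])
--         buckets.setdefault(key, []).append(unit)
--
--     # FIFO round-robin queue of (bucket, next position); a finished bucket is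
--     # simply not re-enqueued, so exhausted buckets are never rescanned.
--     queue = [(buckets[key], 0) for key in sorted(buckets)]
--     head = 0
--     selected = []
--     while head < len(queue) and len(selected) < max_units:
--         bucket, position = queue[head]
--         head += 1
--         selected.append(bucket[position])
--         if position + 1 < len(bucket):
--             queue.append((bucket, position + 1))
--     return selected
-- ===== Notes on version B (the rewrite author's own statement) =====
-- stated objective: alternative
-- what changed: Replaces A's repeated while-loop passes over all sorted bucket keys (with a positions dict and a made_progress flag, rescanning exhausted buckets each pass) with a single FIFO queue of (bucket, position) entries in which an exhausted bucket is simply not re-enqueued.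
import Mathlib
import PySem

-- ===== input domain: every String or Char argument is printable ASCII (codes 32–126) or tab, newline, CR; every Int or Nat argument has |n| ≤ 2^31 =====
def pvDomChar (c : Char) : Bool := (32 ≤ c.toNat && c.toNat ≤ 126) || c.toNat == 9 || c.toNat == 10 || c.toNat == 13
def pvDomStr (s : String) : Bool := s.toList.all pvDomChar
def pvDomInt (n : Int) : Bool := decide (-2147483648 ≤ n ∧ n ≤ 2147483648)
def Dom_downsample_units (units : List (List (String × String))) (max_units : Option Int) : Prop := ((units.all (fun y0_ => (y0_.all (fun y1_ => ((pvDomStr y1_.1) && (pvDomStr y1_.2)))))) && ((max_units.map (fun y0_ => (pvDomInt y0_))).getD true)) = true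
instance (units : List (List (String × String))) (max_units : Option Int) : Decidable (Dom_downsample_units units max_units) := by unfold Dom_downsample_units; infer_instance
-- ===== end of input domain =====

-- B replaces A's repeated full passes over all bucket keys (skipping exhausted ones via a
-- positions dict) by a FIFO queue of (bucket, position) entries in which an exhausted bucket is
-- simply not re-enqueued; same selection, no rescans of exhausted buckets.

-- shared by both Pythons line for line: key extraction, bucket building, sorted key order
def pvKey (u : List (String × String)) : String × String :=
  ((PySem.Dict.mk u).getD "part_kind" "", (PySem.Dict.mk u).getD "repo_slug" "")

def pvBuckets (units : List (List (String × String))) :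
    PySem.Dict (String × String) (List (List (String × String))) :=
  units.foldl (fun d u => d.modify (pvKey u) [] (fun b => b ++ [u])) (PySem.Dict.mk [])

def pvOrderedKeys (buckets : PySem.Dict (String × String) (List (List (String × String)))) :
    List (String × String) :=
  PySem.List.sorted buckets.keys (fun k => (toLex k : String ×ₗ String))

-- ===== PORT A =====
-- the for-loop over ordered_keys (continue / append / positions[key] += 1 / break)
def pvInnerA (buckets : PySem.Dict (String × String) (List (List (String × String)))) (m : Int) :
    List (String × String) → List (List (String × String)) → PySem.Dict (String × String) Int → Bool →
    (List (List (String × String)) × PySem.Dict (String × String) Int × Bool)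
  | [], sel, pos, made => (sel, pos, made)
  | k :: ks, sel, pos, made =>
    let p := pos.getD k 0
    let b := buckets.getD k []
    if (b.length : Int) ≤ p then pvInnerA buckets m ks sel pos made
    else
      let sel' := sel ++ [PySem.List.pyGetD b p []]
      let pos' := pos.insert k (p + 1)
      if m ≤ (sel'.length : Int) then (sel', pos', true)
      else pvInnerA buckets m ks sel' pos' true

-- the while-loop; fuel is only an upper bound on the number of passes (each pass that continues
-- adds at least one element, so m.toNat + 1 passes are never exceeded)
def pvOuterA (buckets : PySem.Dict (String × String) (List (List (String × String)))) (m : Int)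
    (keys : List (String × String)) :
    Nat → List (List (String × String)) → PySem.Dict (String × String) Int → List (List (String × String))
  | 0, sel, _ => sel
  | fuel+1, sel, pos =>
    if (sel.length : Int) < m then
      let r := pvInnerA buckets m keys sel pos false
      if r.2.2 then pvOuterA buckets m keys fuel r.1 r.2.1 else r.1
    else sel

def downsample_units (units : List (List (String × String))) (max_units : Option Int) :
    List (List (String × String)) :=
  match max_units with
  | none => units
  | some m =>
    if (units.length : Int) ≤ m then units
    else
      let buckets := pvBuckets units
      let ordered := pvOrderedKeys buckets
      let positions := ordered.foldl (fun d k => d.insert k (0 : Int)) (PySem.Dict.mk [])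
      pvOuterA buckets m ordered (m.toNat + 1) [] positions

-- ===== PORT B =====
-- the queue loop of Source B; the head-index queue is modelled as the list from the head onwards
-- (queue[head] / head += 1 = take the first element, queue.append = append at the tail)
def pvLoopB (m : Int) :
    List (List (String × String)) → List ((List (List (String × String))) × Int) →
    List (List (String × String))
  | sel, [] => sel
  | sel, (b, p) :: rest =>
    if h : (sel.length : Int) < m then
      pvLoopB m (sel ++ [PySem.List.pyGetD b p []])
        (rest ++ (if p + 1 < (b.length : Int) then [(b, p + 1)] else []))
    else sel
  termination_by sel q => (m - (sel.length : Int)).toNat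
  decreasing_by simp; omega

def downsample_units_alt (units : List (List (String × String))) (max_units : Option Int) :
    List (List (String × String)) :=
  match max_units with
  | none => units
  | some m =>
    if (units.length : Int) ≤ m then units
    else
      let buckets := pvBuckets units
      let queue := (pvOrderedKeys buckets).map (fun k => (buckets.getD k [], (0 : Int)))
      pvLoopB m [] queue

-- ===== PRECONDITION & SPEC =====
-- Pre_ excludes exactly the inputs where Python raises KeyError: downsampling is actually
-- performed (max_units is a number and len(units) > max_units) but some unit lacks the
-- "part_kind" or "repo_slug" key.
def Pre_downsample_units (units : List (List (String × String))) (max_units : Option Int) : Prop :=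
  match max_units with
  | none => True
  | some m =>
    (units.length : Int) ≤ m ∨
      ∀ u ∈ units, (PySem.Dict.mk u).contains "part_kind" = true ∧
        (PySem.Dict.mk u).contains "repo_slug" = true
instance (units : List (List (String × String))) (max_units : Option Int) :
    Decidable (Pre_downsample_units units max_units) := by
  unfold Pre_downsample_units
  cases max_units <;> infer_instance

def pvWitness_downsample_units : (List (List (String × String))) × Option Int :=
  ([[("part_kind", "doc"), ("repo_slug", "r1")], [("part_kind", "doc"), ("repo_slug", "r2")]], some 1)

def Spec_downsample_units (units : List (List (String × String))) (max_units : Option Int) (out : List (List (String × String))) : Prop := out = downsample_units_alt units max_units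
instance (units : List (List (String × String))) (max_units : Option Int) (out : List (List (String × String))) : Decidable (Spec_downsample_units units max_units out) := by unfold Spec_downsample_units; infer_instance

-- ===== CLAIM (what is proved, stated in full; the proofs are below) =====
def Claim_equal_downsample_units : Prop := ∀ (units : List (List (String × String))) (max_units : Option Int), Dom_downsample_units units max_units → Pre_downsample_units units max_units → Spec_downsample_units units max_units (downsample_units units max_units)

-- ===== LEMMAS AND PROOFS =====

-- the per-key view of the state A keeps in its positions dict: the bucket of k together with the
-- current position, provided the bucket is not exhausted
def pvLive (buckets : PySem.Dict (String × String) (List (List (String × String))))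
    (pos : PySem.Dict (String × String) Int) (k : String × String) :
    Option (List (List (String × String)) × Int) :=
  let b := buckets.getD k []
  let p := pos.getD k 0
  if p < (b.length : Int) then some (b, p) else none

-- one round-robin step on a live entry: advance or retire the bucket
def pvBump (bp : (List (List (String × String))) × Int) : Option ((List (List (String × String))) × Int) :=
  if bp.2 + 1 < (bp.1.length : Int) then some (bp.1, bp.2 + 1) else none

theorem pvLoopB_of_full (m : Int) (sel : List (List (String × String)))
    (q : List ((List (List (String × String))) × Int)) (h : ¬ ((sel.length : Int) < m)) :
    pvLoopB m sel q = sel := by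
  cases q with
  | nil => simp [pvLoopB]
  | cons bp rest => obtain ⟨b, p⟩ := bp; simp [pvLoopB, h]

theorem pvOuterA_of_full (buckets : PySem.Dict (String × String) (List (List (String × String))))
    (m : Int) (keys : List (String × String)) (fuel : Nat) (sel : List (List (String × String)))
    (pos : PySem.Dict (String × String) Int) (h : ¬ ((sel.length : Int) < m)) :
    pvOuterA buckets m keys fuel sel pos = sel := by
  cases fuel with
  | zero => simp [pvOuterA]
  | succ n => simp [pvOuterA, h]

theorem pvInnerA_pos_untouched (buckets : PySem.Dict (String × String) (List (List (String × String))))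
    (m : Int) (KS : List (String × String)) :
    ∀ (sel : List (List (String × String))) (pos : PySem.Dict (String × String) Int) (made : Bool)
      (k' : String × String), k' ∉ KS →
      (pvInnerA buckets m KS sel pos made).2.1.getD k' 0 = pos.getD k' 0 := by
  induction KS with
  | nil => intro sel pos made k' h; simp [pvInnerA]
  | cons k ks ih =>
    intro sel pos made k' h
    simp only [List.mem_cons, not_or] at h
    obtain ⟨hk, hks⟩ := h
    simp only [pvInnerA]
    split
    · exact ih sel pos made k' hks
    · split
      · simpa using PySem.Dict.getD_insert_of_ne pos _ _ hk
      · rw [ih _ _ _ k' hks]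
        simpa using PySem.Dict.getD_insert_of_ne pos _ _ hk

theorem pvInner_eq (buckets : PySem.Dict (String × String) (List (List (String × String))))
    (m : Int) (KS : List (String × String)) :
    ∀ (sel : List (List (String × String))) (pos : PySem.Dict (String × String) Int) (made : Bool)
      (tail : List ((List (List (String × String))) × Int)),
      KS.Nodup → (sel.length : Int) < m →
      (if (sel.length : Int) + (KS.filterMap (pvLive buckets pos)).length < m then
        (pvInnerA buckets m KS sel pos made).1 =
            sel ++ (KS.filterMap (pvLive buckets pos)).map (fun bp => PySem.List.pyGetD bp.1 bp.2 []) ∧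
        (pvInnerA buckets m KS sel pos made).2.2 =
            (made || !(KS.filterMap (pvLive buckets pos)).isEmpty) ∧
        KS.filterMap (pvLive buckets (pvInnerA buckets m KS sel pos made).2.1) =
            (KS.filterMap (pvLive buckets pos)).filterMap pvBump ∧
        pvLoopB m sel ((KS.filterMap (pvLive buckets pos)) ++ tail) =
            pvLoopB m (sel ++ (KS.filterMap (pvLive buckets pos)).map (fun bp => PySem.List.pyGetD bp.1 bp.2 []))
              (tail ++ (KS.filterMap (pvLive buckets pos)).filterMap pvBump)
      else
        ((pvInnerA buckets m KS sel pos made).1.length : Int) = m ∧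
        (pvInnerA buckets m KS sel pos made).2.2 = true ∧
        pvLoopB m sel ((KS.filterMap (pvLive buckets pos)) ++ tail) =
            (pvInnerA buckets m KS sel pos made).1) := by
  induction KS with
  | nil =>
    intro sel pos made tail _ hsel
    rw [if_pos (by simpa using hsel)]
    exact ⟨by simp [pvInnerA], by simp [pvInnerA], by simp, by simp⟩
  | cons k ks ih =>
    intro sel pos made tail hnd hsel
    obtain ⟨hk, hks⟩ := List.nodup_cons.mp hnd
    by_cases hp : ((buckets.getD k []).length : Int) ≤ pos.getD k 0
    · -- k's bucket is exhausted: A continues, and the entry is absent from the live list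
      have hlive : pvLive buckets pos k = none := by
        unfold pvLive; rw [if_neg (by omega)]
      have hA : pvInnerA buckets m (k :: ks) sel pos made = pvInnerA buckets m ks sel pos made := by
        simp only [pvInnerA, if_pos hp]
      have hdead' : pvLive buckets (pvInnerA buckets m ks sel pos made).2.1 k = none := by
        unfold pvLive
        rw [pvInnerA_pos_untouched buckets m ks sel pos made k hk, if_neg (by omega)]
      have hih := ih sel pos made tail hks hsel
      rw [hA]
      simp only [List.filterMap_cons, hlive, hdead']
      exact hih
    · have hplt : pos.getD k 0 < ((buckets.getD k []).length : Int) := lt_of_not_ge hp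
      have hlive : pvLive buckets pos k = some (buckets.getD k [], pos.getD k 0) := by
        unfold pvLive; rw [if_pos hplt]
      by_cases hbrk : m ≤ ((sel ++ [PySem.List.pyGetD (buckets.getD k []) (pos.getD k 0) []]).length : Int)
      · -- the append reaches max_units: A breaks out of the for-loop
        have hA : pvInnerA buckets m (k :: ks) sel pos made =
            (sel ++ [PySem.List.pyGetD (buckets.getD k []) (pos.getD k 0) []],
             pos.insert k (pos.getD k 0 + 1), true) := by
          simp only [pvInnerA, if_neg hp, if_pos hbrk]
        have hm : m = (sel.length : Int) + 1 := by simp at hbrk; omega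
        rw [if_neg (by simp only [List.filterMap_cons, hlive]; simp; omega)]
        refine ⟨by rw [hA]; simp; omega, by rw [hA], ?_⟩
        simp only [List.filterMap_cons, hlive, List.cons_append]
        rw [pvLoopB, dif_pos hsel, hA]
        exact pvLoopB_of_full m _ _ (by simp; omega)
      · -- no break: A proceeds to the remaining keys with the bumped position
        have hsel' : ((sel ++ [PySem.List.pyGetD (buckets.getD k []) (pos.getD k 0) []]).length : Int) < m :=
          lt_of_not_ge hbrk
        have hA : pvInnerA buckets m (k :: ks) sel pos made =
            pvInnerA buckets m ks (sel ++ [PySem.List.pyGetD (buckets.getD k []) (pos.getD k 0) []])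
              (pos.insert k (pos.getD k 0 + 1)) true := by
          simp only [pvInnerA, if_neg hp, if_neg hbrk]
        have hsame : ks.filterMap (pvLive buckets (pos.insert k (pos.getD k 0 + 1))) =
            ks.filterMap (pvLive buckets pos) := by
          apply List.filterMap_congr
          intro x hx
          have hxk : x ≠ k := fun h => hk (h ▸ hx)
          unfold pvLive
          rw [PySem.Dict.getD_insert_of_ne pos _ _ hxk]
        have hih := ih (sel ++ [PySem.List.pyGetD (buckets.getD k []) (pos.getD k 0) []])
          (pos.insert k (pos.getD k 0 + 1)) true
          (tail ++ (if pos.getD k 0 + 1 < ((buckets.getD k []).length : Int) then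
            [(buckets.getD k [], pos.getD k 0 + 1)] else [])) hks hsel'
        rw [hsame] at hih
        have hRk : (pvInnerA buckets m ks
            (sel ++ [PySem.List.pyGetD (buckets.getD k []) (pos.getD k 0) []])
            (pos.insert k (pos.getD k 0 + 1)) true).2.1.getD k 0 = pos.getD k 0 + 1 := by
          rw [pvInnerA_pos_untouched buckets m ks _ _ _ k hk, PySem.Dict.getD_insert_self]
        have hliveR : pvLive buckets (pvInnerA buckets m ks
            (sel ++ [PySem.List.pyGetD (buckets.getD k []) (pos.getD k 0) []])
            (pos.insert k (pos.getD k 0 + 1)) true).2.1 k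
            = pvBump (buckets.getD k [], pos.getD k 0) := by
          unfold pvLive pvBump; rw [hRk]
        rw [hA]
        simp only [List.filterMap_cons, hlive, hliveR]
        by_cases hc : (sel.length : Int) + 1 + ((ks.filterMap (pvLive buckets pos)).length : Int) < m
        · rw [if_pos (by simp; omega)]
          rw [if_pos (by simp; omega)] at hih
          obtain ⟨h1, h2, h3, h4⟩ := hih
          refine ⟨by rw [h1]; simp, by simp [h2], ?_, ?_⟩
          · by_cases hq : pos.getD k 0 + 1 < ((buckets.getD k []).length : Int) <;>
              simp [pvBump, hq, h3]
          · simp only [List.cons_append]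
            rw [pvLoopB, dif_pos hsel]
            by_cases hq : pos.getD k 0 + 1 < ((buckets.getD k []).length : Int)
            · rw [if_pos hq] at h4 ⊢
              rw [List.append_assoc, h4]
              simp [pvBump, hq]
            · rw [if_neg hq] at h4 ⊢
              rw [List.append_assoc, h4]
              simp [pvBump, hq]
        · rw [if_neg (by simp; omega)]
          rw [if_neg (by simp; omega)] at hih
          obtain ⟨h1, h2, h3⟩ := hih
          refine ⟨by simpa using h1, h2, ?_⟩
          simp only [List.cons_append]
          rw [pvLoopB, dif_pos hsel]
          by_cases hq : pos.getD k 0 + 1 < ((buckets.getD k []).length : Int)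
          · rw [if_pos hq] at h3 ⊢
            rw [List.append_assoc, h3]
          · rw [if_neg hq] at h3 ⊢
            rw [List.append_assoc, h3]

theorem pvOuter_eq (buckets : PySem.Dict (String × String) (List (List (String × String))))
    (m : Int) (KS : List (String × String)) (hnd : KS.Nodup) :
    ∀ (fuel : Nat) (sel : List (List (String × String))) (pos : PySem.Dict (String × String) Int),
      (m - (sel.length : Int)).toNat < fuel →
      pvOuterA buckets m KS fuel sel pos = pvLoopB m sel (KS.filterMap (pvLive buckets pos)) := by
  intro fuel
  induction fuel with
  | zero => intro sel pos h; omega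
  | succ n ih =>
    intro sel pos hfuel
    by_cases hsel : (sel.length : Int) < m
    · have hin := pvInner_eq buckets m KS sel pos false [] hnd hsel
      simp only [pvOuterA, if_pos hsel]
      by_cases hc : (sel.length : Int) + ((KS.filterMap (pvLive buckets pos)).length : Int) < m
      · rw [if_pos (by exact_mod_cast hc)] at hin
        obtain ⟨h1, h2, h3, h4⟩ := hin
        by_cases hL : KS.filterMap (pvLive buckets pos) = []
        · have h2' : (pvInnerA buckets m KS sel pos false).2.2 = false := by
            simpa [hL] using h2
          rw [h2']
          simp only [Bool.false_eq_true, if_false]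
          rw [h1]
          simp [hL, pvLoopB]
        · have h2' : (pvInnerA buckets m KS sel pos false).2.2 = true := by
            simp [h2, List.isEmpty_iff, hL]
          simp only [h2', if_pos]
          have hlen : (pvInnerA buckets m KS sel pos false).1.length
              = sel.length + (KS.filterMap (pvLive buckets pos)).length := by
            simp [h1]
          have := ih (pvInnerA buckets m KS sel pos false).1 (pvInnerA buckets m KS sel pos false).2.1
            (by
              have hpos : 0 < (KS.filterMap (pvLive buckets pos)).length :=
                List.length_pos_iff.mpr hL
              omega)
          rw [this, h3, h1]
          simpa using h4.symm
      · rw [if_neg (by exact_mod_cast hc)] at hin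
        obtain ⟨h1, h2, h3⟩ := hin
        simp only [h2, if_pos]
        rw [pvOuterA_of_full buckets m KS n _ _ (by omega)]
        simpa using h3.symm
    · rw [pvOuterA_of_full buckets m KS (n+1) sel pos hsel,
        pvLoopB_of_full m sel _ hsel]

-- initial positions: every key reads as 0
theorem pvPos0_getD (l : List (String × String)) :
    ∀ (d : PySem.Dict (String × String) Int) (k : String × String), d.getD k 0 = 0 →
      (l.foldl (fun d k => d.insert k (0 : Int)) d).getD k 0 = 0 := by
  induction l with
  | nil => intro d k h; simpa using h
  | cons a l ih =>
    intro d k h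
    simp only [List.foldl_cons]
    refine ih _ _ ?_
    by_cases hk : k = a
    · subst hk; simp [PySem.Dict.getD_insert_self]
    · rw [PySem.Dict.getD_insert_of_ne _ _ _ hk]; exact h

theorem pvBuckets_getD (units : List (List (String × String))) (k : String × String) :
    (pvBuckets units).getD k [] =
      List.map (fun x => x.2) (List.filter (fun p => p.1 == k) (units.map (fun u => (pvKey u, u)))) := by
  have h : pvBuckets units = List.foldl (fun d p => d.modify p.1 [] (fun b => b ++ [p.2]))
      (PySem.Dict.mk []) (units.map (fun u => (pvKey u, u))) := by
    unfold pvBuckets; rw [List.foldl_map]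
  rw [h]
  exact PySem.Dict.getD_foldl_modify_append _ _ _

theorem pvBuckets_keys (units : List (List (String × String))) :
    (pvBuckets units).keys = PySem.Set.ofList (units.map pvKey) :=
  PySem.Dict.keys_foldl_modify_key units pvKey [] (fun _ u => fun b => b ++ [u]) (PySem.Dict.mk [])

theorem pvBuckets_getD_ne_nil (units : List (List (String × String))) (k : String × String)
    (hk : k ∈ (pvBuckets units).keys) : (pvBuckets units).getD k [] ≠ [] := by
  rw [pvBuckets_keys] at hk
  rw [PySem.Set.mem_ofList] at hk
  obtain ⟨u, hu, hku⟩ := List.mem_map.mp hk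
  rw [pvBuckets_getD]
  intro hnil
  have : (u : List (String × String)) ∈ List.map (fun x => x.2)
      (List.filter (fun p => p.1 == k) (units.map (fun u => (pvKey u, u)))) := by
    refine List.mem_map.mpr ⟨(pvKey u, u), ?_, rfl⟩
    refine List.mem_filter.mpr ⟨List.mem_map.mpr ⟨u, hu, rfl⟩, ?_⟩
    simp [hku]
  rw [hnil] at this
  simp at this

-- ===== VERDICT (by name: the statement is the Claim_ definition above) =====
theorem downsample_units_spec : Claim_equal_downsample_units := by
  intro units max_units _hdom _hpre
  unfold Spec_downsample_units
  cases max_units with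
  | none => rfl
  | some m =>
    show downsample_units units (some m) = downsample_units_alt units (some m)
    unfold downsample_units downsample_units_alt
    by_cases hle : (units.length : Int) ≤ m
    · simp [hle]
    · simp only [if_neg hle]
      have hnd : (pvOrderedKeys (pvBuckets units)).Nodup := by
        unfold pvOrderedKeys
        refine (PySem.List.sorted_perm _ _ _).nodup_iff.mpr ?_
        exact PySem.Dict.nodup_keys_foldl_modify_key units pvKey [] _ (PySem.Dict.mk [])
          (by simp [PySem.Dict.keys])
      rw [pvOuter_eq (pvBuckets units) m (pvOrderedKeys (pvBuckets units)) hnd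
        (m.toNat + 1) [] _ (by simp)]
      congr 1
      have hmem : ∀ k ∈ pvOrderedKeys (pvBuckets units),
          pvLive (pvBuckets units)
            ((pvOrderedKeys (pvBuckets units)).foldl (fun d k => d.insert k (0 : Int)) (PySem.Dict.mk []))
            k = some ((pvBuckets units).getD k [], 0) := by
        intro k hkmem
        have hkeys : k ∈ (pvBuckets units).keys :=
          (PySem.List.sorted_perm _ _ _).mem_iff.mp hkmem
        have hpos : ((pvOrderedKeys (pvBuckets units)).foldl
            (fun d k => d.insert k (0 : Int)) (PySem.Dict.mk [])).getD k 0 = 0 :=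
          pvPos0_getD _ _ _ (by simp [PySem.Dict.getD, PySem.Dict.get?])
        have hne := pvBuckets_getD_ne_nil units k hkeys
        have hlen : (0 : Int) < (((pvBuckets units).getD k []).length : Int) := by
          exact_mod_cast List.length_pos_iff.mpr hne
        unfold pvLive
        simp [hpos, hne]
      rw [List.filterMap_congr hmem]
      simp
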